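-- pv_equiv track=rewrite | github.com/tomfunk/advent_of_code | 2023/day_10.py | get_srcs_dests
-- ===== SOURCE A (Python) =====
-- def get_step_direction(src, dest):
--     i, j = dest
--     m, n = src
--     if i == m and j == n - 1:
--         return "left"
--     elif i == m and j == n + 1:
--         return "right"
--     elif i == m + 1 and j == n:
--         return "down"
--     elif i == m - 1 and j == n:
--         return "up"
--     return "invalid"
--
-- def validate_step(src, dest, lines):
--     i, j = dest
--     m, n = src
--     next_pipe = lines[i][j]
--     sd = get_step_direction(src, dest)
--     if next_pipe == "|" and sd in ["up", "down"]:
--         return (i + i - m, j)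
--     elif next_pipe == "-" and sd in ["left", "right"]:
--         return (i, j + j - n)
--     elif next_pipe == "L" and sd == "left":
--         return (i - 1, j)
--     elif next_pipe == "L" and sd == "down":
--         return (i, j + 1)
--     elif next_pipe == "J" and sd == "right":
--         return (i - 1, j)
--     elif next_pipe == "J" and sd == "down":
--         return (i, j - 1)
--     elif next_pipe == "7" and sd == "right":
--         return (i + 1, j)
--     elif next_pipe == "7" and sd == "up":
--         return (i, j - 1)
--     elif next_pipe == "F" and sd == "left":
--         return (i + 1, j)
--     elif next_pipe == "F" and sd == "up":
--         return (i, j + 1)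
--     return "error"
--
-- def find_start(lines):
--     for i in range(len(lines)):
--         for j in range(len(lines[i])):
--             if lines[i][j] == "S":
--                 return i, j
--
-- def get_srcs_dests(lines):
--     start = find_start(lines)
--     dests = [
--         (start[0], start[1] - 1),
--         (start[0], start[1] + 1),
--         (start[0] - 1, start[1]),
--         (start[0] + 1, start[1]),
--     ]
--     dests = list(filter(lambda x: x[0] >= 0 and x[1] >= 0 and validate_step(start, x, lines) != "error", dests))
--     srcs = [start for _ in range(len(dests))]
--     return srcs, dests
-- ===== SOURCE B (Python) =====
-- OPENINGS = {
--     "|": ((-1, 0), (1, 0)),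
--     "-": ((0, -1), (0, 1)),
--     "L": ((-1, 0), (0, 1)),
--     "J": ((-1, 0), (0, -1)),
--     "7": ((1, 0), (0, -1)),
--     "F": ((1, 0), (0, 1)),
-- }
--
-- def get_srcs_dests(lines):
--     # one pass over the grid: find the start and build a reverse-adjacency
--     # index mapping each cell to the list of pipe cells that open into it
--     start = None
--     into = {}
--     for i, row in enumerate(lines):
--         for j, c in enumerate(row):
--             if c == "S" and start is None:
--                 start = (i, j)
--             for di, dj in OPENINGS.get(c, ()):
--                 into.setdefault((i + di, j + dj), []).append((i, j))
--     pointing = into.get(start, [])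
--     si, sj = start
--     dests = [n for n in ((si, sj - 1), (si, sj + 1), (si - 1, sj), (si + 1, sj))
--              if n in pointing]
--     return [start] * len(dests), dests
-- ===== Notes on version B (the rewrite author's own statement) =====
-- stated objective: alternative
-- what changed: Inverts the direction of reasoning: instead of probing the four neighbors of the start and validating each neighbor's pipe against the step direction, B makes one pass over the whole grid building a reverse-adjacency index (cell -> pipe cells that open into it), looks up the start in that index, and emits the four candidates in A's order by membership.
import Mathlib
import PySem

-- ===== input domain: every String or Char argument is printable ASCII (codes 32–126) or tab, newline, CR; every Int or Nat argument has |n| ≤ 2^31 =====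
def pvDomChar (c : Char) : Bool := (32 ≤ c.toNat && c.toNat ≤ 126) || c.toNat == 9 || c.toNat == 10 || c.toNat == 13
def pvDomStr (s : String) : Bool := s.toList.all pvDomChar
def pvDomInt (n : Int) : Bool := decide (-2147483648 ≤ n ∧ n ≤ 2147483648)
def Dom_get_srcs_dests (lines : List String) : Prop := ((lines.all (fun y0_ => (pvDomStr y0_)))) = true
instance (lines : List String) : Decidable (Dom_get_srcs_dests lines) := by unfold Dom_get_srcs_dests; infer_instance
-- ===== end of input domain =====

-- B inverts the reasoning: one pass over the grid builds a reverse-adjacency index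
-- (cell -> pipe cells opening into it) and the start is looked up in it
-- (objective: alternative); return-value equivalence only.

-- ===== PORT A =====
def pyGetStepDirection (src dest : Int × Int) : String :=
  let i := dest.1; let j := dest.2; let m := src.1; let n := src.2
  if i = m ∧ j = n - 1 then "left"
  else if i = m ∧ j = n + 1 then "right"
  else if i = m + 1 ∧ j = n then "down"
  else if i = m - 1 ∧ j = n then "up"
  else "invalid"

-- lines[i][j] as A evaluates it; none = IndexError (excluded by Pre_)
def gridAt (lines : List String) (i j : Int) : Option Char :=
  match PySem.List.pyGet? lines i with
  | some s => PySem.Str.pyGet? s j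
  | none => none

-- outer none = IndexError, inner none = the string "error"
def pyValidateStep (src dest : Int × Int) (lines : List String) : Option (Option (Int × Int)) :=
  let i := dest.1; let j := dest.2; let m := src.1; let n := src.2
  match gridAt lines i j with
  | none => none
  | some next_pipe =>
    let sd := pyGetStepDirection src dest
    some (
      if next_pipe = '|' ∧ (sd = "up" ∨ sd = "down") then some (i + i - m, j)
      else if next_pipe = '-' ∧ (sd = "left" ∨ sd = "right") then some (i, j + j - n)
      else if next_pipe = 'L' ∧ sd = "left" then some (i - 1, j)
      else if next_pipe = 'L' ∧ sd = "down" then some (i, j + 1)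
      else if next_pipe = 'J' ∧ sd = "right" then some (i - 1, j)
      else if next_pipe = 'J' ∧ sd = "down" then some (i, j - 1)
      else if next_pipe = '7' ∧ sd = "right" then some (i + 1, j)
      else if next_pipe = '7' ∧ sd = "up" then some (i, j - 1)
      else if next_pipe = 'F' ∧ sd = "left" then some (i + 1, j)
      else if next_pipe = 'F' ∧ sd = "up" then some (i, j + 1)
      else none)

def pyFindStartRow (cs : List Char) (j : Int) : Option Int :=
  match cs with
  | [] => none
  | c :: t => if c = 'S' then some j else pyFindStartRow t (j + 1)

def pyFindStart (ls : List String) (i : Int) : Option (Int × Int) :=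
  match ls with
  | [] => none
  | s :: t =>
    match pyFindStartRow s.toList 0 with
    | some j => some (i, j)
    | none => pyFindStart t (i + 1)

def get_srcs_dests (lines : List String) : (List (Int × Int)) × (List (Int × Int)) :=
  match pyFindStart lines 0 with
  | none => ([], [])   -- Python raises TypeError here (no 'S'); excluded by Pre_
  | some start =>
    let dests : List (Int × Int) :=
      [ (start.1, start.2 - 1), (start.1, start.2 + 1),
        (start.1 - 1, start.2), (start.1 + 1, start.2) ]
    let dests := dests.filter (fun x =>
      decide (x.1 ≥ 0) && decide (x.2 ≥ 0) &&
      (match pyValidateStep start x lines with | some (some _) => true | _ => false))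
    (List.replicate dests.length start, dests)

-- ===== PORT B =====
-- OPENINGS.get(c, ()): the two directions each pipe opens to
def openingsB (c : Char) : List (Int × Int) :=
  if c = '|' then [(-1, 0), (1, 0)]
  else if c = '-' then [(0, -1), (0, 1)]
  else if c = 'L' then [(-1, 0), (0, 1)]
  else if c = 'J' then [(-1, 0), (0, -1)]
  else if c = '7' then [(1, 0), (0, -1)]
  else if c = 'F' then [(1, 0), (0, 1)]
  else []

def get_srcs_dests_alt (lines : List String) : (List (Int × Int)) × (List (Int × Int)) :=
  -- one pass: find the start and build the reverse-adjacency index `into`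
  let st := (PySem.List.enumerate lines 0).foldl
    (fun (acc : Option (Int × Int) × PySem.Dict (Int × Int) (List (Int × Int))) p =>
      (PySem.List.enumerate p.2.toList 0).foldl
        (fun acc q =>
          (if q.2 = 'S' ∧ acc.1 = none then some (p.1, q.1) else acc.1,
           (openingsB q.2).foldl
             (fun d off => d.modify (p.1 + off.1, q.1 + off.2) [] (· ++ [(p.1, q.1)]))
             acc.2))
        acc)
    (none, PySem.Dict.empty)
  match st.1 with
  | none => ([], [])   -- Python raises TypeError here (no 'S'); excluded by Pre_
  | some (si, sj) =>
    let pointing := st.2.getD (si, sj) []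
    let dests := [(si, sj - 1), (si, sj + 1), (si - 1, sj), (si + 1, sj)].filter
      (fun n => pointing.contains n)
    (List.replicate dests.length (si, sj), dests)

-- ===== PRECONDITION & SPEC =====
-- range conditions at the first 'S': all guarded neighbour accesses stay in the grid
def pvRangeOk (lines : List String) : Bool :=
  match lines.findIdx? (fun s => 'S' ∈ s.toList) with
  | none => false
  | some si =>
    let row := (lines.getD si "").toList
    let sj := row.idxOf 'S'
    decide (sj + 1 < row.length) &&
    (decide (si = 0) || decide (sj < (lines.getD (si - 1) "").toList.length)) &&
    decide (si + 1 < lines.length) &&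
    decide (sj < (lines.getD (si + 1) "").toList.length)

-- Pre_ excludes exactly the inputs where the Python A raises: no 'S' anywhere
-- (TypeError on start[0]) or a nonnegative neighbour of the first 'S' lying
-- beyond the grid (IndexError on lines[i][j]).
def Pre_get_srcs_dests (lines : List String) : Prop := pvRangeOk lines = true
instance (lines : List String) : Decidable (Pre_get_srcs_dests lines) := by
  unfold Pre_get_srcs_dests; infer_instance

def pvWitness_get_srcs_dests : List String := ["S-", "||"]

def Spec_get_srcs_dests (lines : List String) (out : (List (Int × Int)) × (List (Int × Int))) : Prop := out = get_srcs_dests_alt lines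
instance (lines : List String) (out : (List (Int × Int)) × (List (Int × Int))) : Decidable (Spec_get_srcs_dests lines out) := by unfold Spec_get_srcs_dests; infer_instance

-- ===== CLAIM (what is proved, stated in full; the proofs are below) =====
def Claim_equal_get_srcs_dests : Prop := ∀ (lines : List String), Dom_get_srcs_dests lines → Pre_get_srcs_dests lines → Spec_get_srcs_dests lines (get_srcs_dests lines)

-- ===== LEMMAS AND PROOFS =====

-- non-wrapping list access at an Int index (proof-side only)
def atIdx {α : Type} (xs : List α) (k : Int) : Option α :=
  if 0 ≤ k then xs[k.toNat]? else none

theorem atIdx_nil {α : Type} (k : Int) : atIdx ([] : List α) k = none := by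
  unfold atIdx; split_ifs <;> simp

theorem atIdx_cons {α : Type} (x : α) (xs : List α) (k : Int) :
    atIdx (x :: xs) k = if k = 0 then some x else atIdx xs (k - 1) := by
  unfold atIdx
  by_cases h0 : k = 0
  · subst h0; simp
  · by_cases hn : 0 ≤ k
    · have h1 : 0 ≤ k - 1 := by omega
      have h2 : k.toNat = (k - 1).toNat + 1 := by omega
      rw [if_pos hn, if_neg h0, if_pos h1, h2, List.getElem?_cons_succ]
    · have h1 : ¬ (0 ≤ k - 1) := by omega
      rw [if_neg hn, if_neg h0, if_neg h1]

theorem enumFlat_none {α β : Type} (xs : List α) (g : Int → α → List β) :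
    ∀ s : Int, (∀ k a, s ≤ k → g k a = []) →
      (PySem.List.enumerate xs s).flatMap (fun q => g q.1 q.2) = [] := by
  induction xs with
  | nil => intro s _; simp [PySem.List.enumerate_nil]
  | cons x t ih =>
    intro s h
    rw [PySem.List.enumerate_cons, List.flatMap_cons]
    rw [h s x le_rfl, ih (s + 1) (fun k a hk => h k a (by omega))]
    rfl

theorem enumFlat_single {α β : Type} (xs : List α) (g : Int → α → List β) (j0 : Int)
    (hz : ∀ k a, k ≠ j0 → g k a = []) :
    ∀ s : Int, (PySem.List.enumerate xs s).flatMap (fun q => g q.1 q.2) =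
      (match atIdx xs (j0 - s) with | some a => g j0 a | none => []) := by
  induction xs with
  | nil => intro s; simp [PySem.List.enumerate_nil, atIdx_nil]
  | cons x t ih =>
    intro s
    rw [PySem.List.enumerate_cons, List.flatMap_cons, atIdx_cons]
    by_cases hs : s = j0
    · have hz' : j0 - s = 0 := by omega
      have hrest : (PySem.List.enumerate t (s + 1)).flatMap (fun q => g q.1 q.2) = [] :=
        enumFlat_none t g (s + 1) (fun k a hk => hz k a (by omega))
      subst hs
      simp [hz', hrest]
    · have hz' : ¬ (j0 - s = 0) := by omega
      have harith : j0 - s - 1 = j0 - (s + 1) := by omega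
      rw [hz s x (by omega), ih (s + 1)]
      simp [hz', harith]

theorem enumFlat_pair {α β : Type} (xs : List α) (g1 g2 : Int → α → List β)
    (h : ∀ k a, g2 k a ≠ [] → ∀ k' a', k ≤ k' → g1 k' a' = []) :
    ∀ s : Int, (PySem.List.enumerate xs s).flatMap (fun q => g1 q.1 q.2 ++ g2 q.1 q.2) =
      (PySem.List.enumerate xs s).flatMap (fun q => g1 q.1 q.2) ++
      (PySem.List.enumerate xs s).flatMap (fun q => g2 q.1 q.2) := by
  induction xs with
  | nil => intro s; simp [PySem.List.enumerate_nil]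
  | cons x t ih =>
    intro s
    rw [PySem.List.enumerate_cons, List.flatMap_cons, List.flatMap_cons, List.flatMap_cons,
      ih (s + 1)]
    by_cases h2 : g2 s x = []
    · simp [h2, List.append_assoc]
    · have hA : (PySem.List.enumerate t (s + 1)).flatMap (fun q => g1 q.1 q.2) = [] :=
        enumFlat_none t g1 (s + 1) (fun k a hk => h s x h2 k a (by omega))
      rw [hA]
      simp [List.append_assoc]

theorem pairFold {γ σ τ : Type} (l : List γ) (f1 : σ → γ → σ) (f2 : τ → γ → τ) :
    ∀ (a : σ) (b : τ), l.foldl (fun acc x => (f1 acc.1 x, f2 acc.2 x)) (a, b) =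
      (l.foldl f1 a, l.foldl f2 b) := by
  induction l with
  | nil => intro a b; rfl
  | cons x t ih => intro a b; simpa using ih (f1 a x) (f2 b x)

-- proof-side views of B's single pass
def rowCellsOf (p : Int × String) : List ((Int × Int) × Char) :=
  (PySem.List.enumerate p.2.toList 0).map (fun q => ((p.1, q.1), q.2))

def cellsOf (lines : List String) : List ((Int × Int) × Char) :=
  (PySem.List.enumerate lines 0).flatMap rowCellsOf

def stepS (s : Option (Int × Int)) (cell : (Int × Int) × Char) : Option (Int × Int) :=
  if cell.2 = 'S' ∧ s = none then some cell.1 else s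

def dstep (d : PySem.Dict (Int × Int) (List (Int × Int))) (pr : (Int × Int) × (Int × Int)) :
    PySem.Dict (Int × Int) (List (Int × Int)) :=
  d.modify pr.1 [] (· ++ [pr.2])

def pairsOf (cell : (Int × Int) × Char) : List ((Int × Int) × (Int × Int)) :=
  (openingsB cell.2).map (fun off => ((cell.1.1 + off.1, cell.1.2 + off.2), cell.1))

theorem portFold_eq (lines : List String) :
    (PySem.List.enumerate lines 0).foldl
      (fun (acc : Option (Int × Int) × PySem.Dict (Int × Int) (List (Int × Int))) p =>
        (PySem.List.enumerate p.2.toList 0).foldl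
          (fun acc q =>
            (if q.2 = 'S' ∧ acc.1 = none then some (p.1, q.1) else acc.1,
             (openingsB q.2).foldl
               (fun d off => d.modify (p.1 + off.1, q.1 + off.2) [] (· ++ [(p.1, q.1)]))
               acc.2))
          acc)
      (none, PySem.Dict.empty)
    = ((cellsOf lines).foldl stepS none,
       ((cellsOf lines).flatMap pairsOf).foldl dstep PySem.Dict.empty) := by
  have hbody : ∀ (acc : Option (Int × Int) × PySem.Dict (Int × Int) (List (Int × Int)))
      (p : Int × String),
      (PySem.List.enumerate p.2.toList 0).foldl
        (fun acc q =>
          (if q.2 = 'S' ∧ acc.1 = none then some (p.1, q.1) else acc.1,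
           (openingsB q.2).foldl
             (fun d off => d.modify (p.1 + off.1, q.1 + off.2) [] (· ++ [(p.1, q.1)]))
             acc.2))
        acc
      = ((rowCellsOf p).foldl stepS acc.1,
         ((rowCellsOf p).flatMap pairsOf).foldl dstep acc.2) := by
    intro acc p
    obtain ⟨a, b⟩ := acc
    simp only [rowCellsOf, pairsOf, stepS, dstep, List.foldl_flatMap, List.foldl_map]
    exact pairFold (PySem.List.enumerate p.2.toList 0)
      (fun s q => if q.2 = 'S' ∧ s = none then some (p.1, q.1) else s)
      (fun d q => List.foldl
        (fun d off => d.modify (p.1 + off.1, q.1 + off.2) [] (· ++ [(p.1, q.1)]))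
        d (openingsB q.2)) a b
  have hfun : (fun (acc : Option (Int × Int) × PySem.Dict (Int × Int) (List (Int × Int))) p =>
        (PySem.List.enumerate p.2.toList 0).foldl
          (fun acc q =>
            (if q.2 = 'S' ∧ acc.1 = none then some (p.1, q.1) else acc.1,
             (openingsB q.2).foldl
               (fun d off => d.modify (p.1 + off.1, q.1 + off.2) [] (· ++ [(p.1, q.1)]))
               acc.2))
          acc)
      = (fun (acc : Option (Int × Int) × PySem.Dict (Int × Int) (List (Int × Int))) p =>
         ((rowCellsOf p).foldl stepS acc.1, ((rowCellsOf p).flatMap pairsOf).foldl dstep acc.2)) := by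
    funext acc p; exact hbody acc p
  rw [hfun]
  refine (pairFold (PySem.List.enumerate lines 0)
      (fun s p => List.foldl stepS s (rowCellsOf p))
      (fun d p => List.foldl dstep d (List.flatMap pairsOf (rowCellsOf p)))
      none PySem.Dict.empty).trans ?_
  refine Prod.ext ?_ ?_ <;>
    simp only [cellsOf, List.flatMap_assoc, List.foldl_flatMap]

theorem foldS_char (l : List ((Int × Int) × Char)) :
    ∀ s0, l.foldl stepS s0 = (match s0 with
      | some a => some a
      | none => (l.filterMap (fun cell => if cell.2 = 'S' then some cell.1 else none)).head?) := by
  induction l with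
  | nil => intro s0; cases s0 <;> simp
  | cons x t ih =>
    intro s0
    cases s0 with
    | some a => simpa [stepS] using ih (some a)
    | none => by_cases hx : x.2 = 'S' <;> simp [stepS, hx, ih]

theorem filterMap_map' {α β γ : Type} (l : List α) (g : α → β) (f : β → Option γ) :
    (l.map g).filterMap f = l.filterMap (fun x => f (g x)) := by
  induction l with
  | nil => rfl
  | cons x t ih => cases h : f (g x) <;> simp [h, ih]

theorem row_eq (cs : List Char) : ∀ (s : Int), pyFindStartRow cs s =
    ((PySem.List.enumerate cs s).filterMap (fun q => if q.2 = 'S' then some q.1 else none)).head? := by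
  induction cs with
  | nil => intro s; simp [pyFindStartRow, PySem.List.enumerate_nil]
  | cons c t ih =>
    intro s
    rw [PySem.List.enumerate_cons]
    by_cases hc : c = 'S' <;> simp [pyFindStartRow, hc, ih]

theorem find_eq_gen (lines : List String) : ∀ (s : Int), pyFindStart lines s =
    ((PySem.List.enumerate lines s).flatMap (fun p =>
      (PySem.List.enumerate p.2.toList 0).filterMap (fun q =>
        if q.2 = 'S' then some (p.1, q.1) else none))).head? := by
  induction lines with
  | nil => intro s; simp [pyFindStart, PySem.List.enumerate_nil]
  | cons x t ih =>
    intro s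
    rw [PySem.List.enumerate_cons]
    have hrow := row_eq x.toList 0
    have hpair : (PySem.List.enumerate x.toList 0).filterMap (fun q =>
        if q.2 = 'S' then some ((s, x).1, q.1) else none)
        = ((PySem.List.enumerate x.toList 0).filterMap (fun q =>
            if q.2 = 'S' then some q.1 else none)).map (fun j => (s, j)) := by
      induction (PySem.List.enumerate x.toList 0) with
      | nil => simp
      | cons q r ihq =>
        by_cases hq : q.2 = 'S' <;> simp [hq, ihq]
    simp only [List.flatMap_cons, hpair]
    show (match pyFindStartRow x.toList 0 with
          | some j => some (s, j)
          | none => pyFindStart t (s + 1)) = _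
    cases hr : pyFindStartRow x.toList 0 with
    | some j =>
      have hr2 := hr; rw [hrow, List.head?_eq_some_iff] at hr2
      obtain ⟨r, hL⟩ := hr2
      simp [hL]
    | none =>
      have hr2 := hr; rw [hrow, List.head?_eq_none_iff] at hr2
      simp [hr2, ih]

theorem start_eq (lines : List String) :
    (cellsOf lines).foldl stepS none = pyFindStart lines 0 := by
  rw [foldS_char, find_eq_gen lines 0]
  show ((cellsOf lines).filterMap (fun cell => if cell.2 = 'S' then some cell.1 else none)).head? = _
  congr 1
  simp only [cellsOf, List.filterMap_flatMap, rowCellsOf, filterMap_map']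

-- cells whose pipe opens into (si, sj)
def pts (si sj : Int) (pos : Int × Int) (c : Char) : List (Int × Int) :=
  if (openingsB c).any (fun off => decide ((pos.1 + off.1, pos.2 + off.2) = (si, sj))) then [pos] else []

theorem pairfil (t1 t2 pos : Int × Int) (s : Int × Int) (hne : t1 ≠ t2) :
    (([(t1, pos), (t2, pos)] : List ((Int × Int) × (Int × Int))).filter
      (fun pr => pr.1 == s)).map (·.2)
    = if t1 = s ∨ t2 = s then [pos] else [] := by
  by_cases h1 : t1 = s <;> by_cases h2 : t2 = s
  · exact absurd (h1.trans h2.symm) hne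
  all_goals simp [List.filter_cons, List.filter_nil, beq_iff_eq, h1, h2]

theorem cellFilter (si sj : Int) (cell : (Int × Int) × Char) :
    ((pairsOf cell).filter (fun pr => pr.1 == (si, sj))).map (·.2)
    = pts si sj cell.1 cell.2 := by
  obtain ⟨⟨i, j⟩, c⟩ := cell
  unfold pairsOf pts
  by_cases h1 : c = '|'
  · subst h1
    simp only [show openingsB '|' = [((-1 : Int), (0 : Int)), ((1 : Int), (0 : Int))] from rfl,
      List.map_cons, List.map_nil]
    rw [pairfil _ _ _ _ (by simp [Prod.ext_iff])]
    apply if_congr _ rfl rfl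
    simp [Prod.ext_iff] <;> omega
  by_cases h2 : c = '-'
  · subst h2
    simp only [show openingsB '-' = [((0 : Int), (-1 : Int)), ((0 : Int), (1 : Int))] from rfl,
      List.map_cons, List.map_nil]
    rw [pairfil _ _ _ _ (by simp [Prod.ext_iff])]
    apply if_congr _ rfl rfl
    simp [Prod.ext_iff] <;> omega
  by_cases h3 : c = 'L'
  · subst h3
    simp only [show openingsB 'L' = [((-1 : Int), (0 : Int)), ((0 : Int), (1 : Int))] from rfl,
      List.map_cons, List.map_nil]
    rw [pairfil _ _ _ _ (by simp [Prod.ext_iff])]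
    apply if_congr _ rfl rfl
    simp [Prod.ext_iff] <;> omega
  by_cases h4 : c = 'J'
  · subst h4
    simp only [show openingsB 'J' = [((-1 : Int), (0 : Int)), ((0 : Int), (-1 : Int))] from rfl,
      List.map_cons, List.map_nil]
    rw [pairfil _ _ _ _ (by simp [Prod.ext_iff])]
    apply if_congr _ rfl rfl
    simp [Prod.ext_iff] <;> omega
  by_cases h5 : c = '7'
  · subst h5
    simp only [show openingsB '7' = [((1 : Int), (0 : Int)), ((0 : Int), (-1 : Int))] from rfl,
      List.map_cons, List.map_nil]
    rw [pairfil _ _ _ _ (by simp [Prod.ext_iff])]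
    apply if_congr _ rfl rfl
    simp [Prod.ext_iff] <;> omega
  by_cases h6 : c = 'F'
  · subst h6
    simp only [show openingsB 'F' = [((1 : Int), (0 : Int)), ((0 : Int), (1 : Int))] from rfl,
      List.map_cons, List.map_nil]
    rw [pairfil _ _ _ _ (by simp [Prod.ext_iff])]
    apply if_congr _ rfl rfl
    simp [Prod.ext_iff] <;> omega
  · have hop : openingsB c = [] := by
      unfold openingsB
      rw [if_neg h1, if_neg h2, if_neg h3, if_neg h4, if_neg h5, if_neg h6]
    simp [hop]

theorem getD_fold (lines : List String) (si sj : Int) :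
    (((cellsOf lines).flatMap pairsOf).foldl dstep PySem.Dict.empty).getD (si, sj) []
    = (cellsOf lines).flatMap (fun cell => pts si sj cell.1 cell.2) := by
  have h2 : (List.foldl dstep PySem.Dict.empty ((cellsOf lines).flatMap pairsOf)).getD (si, sj) []
      = PySem.Dict.empty.getD (si, sj) [] ++
        (((cellsOf lines).flatMap pairsOf).filter (fun pr => pr.1 == (si, sj))).map (·.2) :=
    PySem.Dict.getD_foldl_modify_append ((cellsOf lines).flatMap pairsOf) PySem.Dict.empty (si, sj)
  rw [h2, List.filter_flatMap, List.map_flatMap]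
  have hfe : (fun cell => ((pairsOf cell).filter (fun pr => pr.1 == (si, sj))).map (·.2))
      = (fun cell => pts si sj cell.1 cell.2) := by
    funext cell; exact cellFilter si sj cell
  simp [hfe]

theorem pts_up (si sj j : Int) (c : Char) :
    pts si sj (si - 1, j) c = if j = sj ∧ c ∈ ['|', '7', 'F'] then [(si - 1, j)] else [] := by
  unfold pts
  by_cases h1 : c = '|' <;> by_cases h2 : c = '-' <;> by_cases h3 : c = 'L' <;>
    by_cases h4 : c = 'J' <;> by_cases h5 : c = '7' <;> by_cases h6 : c = 'F' <;>
    first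
    | (apply if_congr _ rfl rfl
       simp [openingsB, h1, h2, h3, h4, h5, h6, Prod.ext_iff] <;> omega)
    | simp_all

theorem pts_mid (si sj j : Int) (c : Char) :
    pts si sj (si, j) c =
      (if j = sj - 1 ∧ c ∈ ['-', 'L', 'F'] then [(si, j)] else []) ++
      (if j = sj + 1 ∧ c ∈ ['-', 'J', '7'] then [(si, j)] else []) := by
  unfold pts
  by_cases h1 : c = '|' <;> by_cases h2 : c = '-' <;> by_cases h3 : c = 'L' <;>
    by_cases h4 : c = 'J' <;> by_cases h5 : c = '7' <;> by_cases h6 : c = 'F' <;>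
    first
    | (simp [openingsB, h1, h2, h3, h4, h5, h6, Prod.ext_iff] <;>
        (split_ifs <;> simp_all <;> omega))
    | simp_all

theorem pts_down (si sj j : Int) (c : Char) :
    pts si sj (si + 1, j) c = if j = sj ∧ c ∈ ['|', 'L', 'J'] then [(si + 1, j)] else [] := by
  unfold pts
  by_cases h1 : c = '|' <;> by_cases h2 : c = '-' <;> by_cases h3 : c = 'L' <;>
    by_cases h4 : c = 'J' <;> by_cases h5 : c = '7' <;> by_cases h6 : c = 'F' <;>
    first
    | (apply if_congr _ rfl rfl
       simp [openingsB, h1, h2, h3, h4, h5, h6, Prod.ext_iff] <;> omega)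
    | simp_all

theorem pts_other (si sj k j : Int) (c : Char) (hU : k ≠ si - 1) (hM : k ≠ si)
    (hD : k ≠ si + 1) : pts si sj (k, j) c = [] := by
  unfold pts
  by_cases h1 : c = '|' <;> by_cases h2 : c = '-' <;> by_cases h3 : c = 'L' <;>
    by_cases h4 : c = 'J' <;> by_cases h5 : c = '7' <;> by_cases h6 : c = 'F' <;>
    first
    | (simp [openingsB, h1, h2, h3, h4, h5, h6, Prod.ext_iff] <;> omega)
    | simp_all

def rowPickL (cs : List Char) (i j : Int) (chars : List Char) : List (Int × Int) :=
  match atIdx cs j with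
  | some c => if c ∈ chars then [(i, j)] else []
  | none => []

def pickL (lines : List String) (i j : Int) (chars : List Char) : List (Int × Int) :=
  match atIdx lines i with
  | some row => rowPickL row.toList i j chars
  | none => []

theorem row_flat (si sj k : Int) (row : String) :
    (PySem.List.enumerate row.toList 0).flatMap (fun q => pts si sj (k, q.1) q.2)
    = (if k = si - 1 then rowPickL row.toList (si - 1) sj ['|', '7', 'F'] else []) ++
      ((if k = si then rowPickL row.toList si (sj - 1) ['-', 'L', 'F'] ++
          rowPickL row.toList si (sj + 1) ['-', 'J', '7'] else []) ++
       (if k = si + 1 then rowPickL row.toList (si + 1) sj ['|', 'L', 'J'] else [])) := by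
  by_cases hU : k = si - 1
  · subst hU
    rw [if_pos rfl, if_neg (by omega), if_neg (by omega)]
    simp only [pts_up]
    refine (enumFlat_single row.toList
      (fun jj cc => if jj = sj ∧ cc ∈ (['|', '7', 'F'] : List Char) then [(si - 1, jj)] else [])
      sj (fun kk a hk => if_neg (fun h => hk h.1)) 0).trans ?_
    rw [sub_zero]
    cases h : atIdx row.toList sj <;> simp [rowPickL, h]
  by_cases hM : k = si
  · subst hM
    rw [if_neg (by omega), if_pos rfl, if_neg (by omega)]
    simp only [List.nil_append, List.append_nil]
    simp only [pts_mid]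
    refine (enumFlat_pair row.toList
      (fun jj cc => if jj = sj - 1 ∧ cc ∈ (['-', 'L', 'F'] : List Char) then [(k, jj)] else [])
      (fun jj cc => if jj = sj + 1 ∧ cc ∈ (['-', 'J', '7'] : List Char) then [(k, jj)] else [])
      ?_ 0).trans ?_
    · intro kk a hne kk' a' hle
      have hk : kk = sj + 1 := by
        by_contra hx; exact hne (if_neg (fun hc => hx hc.1))
      exact if_neg (fun hc => by omega)
    · refine congrArg₂ (· ++ ·) ?_ ?_
      · refine (enumFlat_single row.toList
          (fun jj cc => if jj = sj - 1 ∧ cc ∈ (['-', 'L', 'F'] : List Char) then [(k, jj)] else [])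
          (sj - 1) (fun kk a hk => if_neg (fun h => hk h.1)) 0).trans ?_
        rw [sub_zero]
        cases h : atIdx row.toList (sj - 1) <;> simp [rowPickL, h]
      · refine (enumFlat_single row.toList
          (fun jj cc => if jj = sj + 1 ∧ cc ∈ (['-', 'J', '7'] : List Char) then [(k, jj)] else [])
          (sj + 1) (fun kk a hk => if_neg (fun h => hk h.1)) 0).trans ?_
        rw [sub_zero]
        cases h : atIdx row.toList (sj + 1) <;> simp [rowPickL, h]
  by_cases hD : k = si + 1
  · subst hD
    rw [if_neg (by omega), if_neg (by omega), if_pos rfl]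
    simp only [pts_down]
    refine (enumFlat_single row.toList
      (fun jj cc => if jj = sj ∧ cc ∈ (['|', 'L', 'J'] : List Char) then [(si + 1, jj)] else [])
      sj (fun kk a hk => if_neg (fun h => hk h.1)) 0).trans ?_
    rw [sub_zero]
    cases h : atIdx row.toList sj <;> simp [rowPickL, h]
  · rw [if_neg hU, if_neg hM, if_neg hD]
    refine (enumFlat_none row.toList (fun jj cc => pts si sj (k, jj) cc) 0
      (fun kk a _ => pts_other si sj k kk a hU hM hD)).trans (by simp)

theorem pointing_eq (lines : List String) (si sj : Int) :
    (cellsOf lines).flatMap (fun cell => pts si sj cell.1 cell.2)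
    = pickL lines (si - 1) sj ['|', '7', 'F'] ++
      ((match atIdx lines si with
        | some row => rowPickL row.toList si (sj - 1) ['-', 'L', 'F'] ++
            rowPickL row.toList si (sj + 1) ['-', 'J', '7']
        | none => []) ++
       pickL lines (si + 1) sj ['|', 'L', 'J']) := by
  have h1 : (cellsOf lines).flatMap (fun cell => pts si sj cell.1 cell.2)
      = (PySem.List.enumerate lines 0).flatMap (fun p =>
          (PySem.List.enumerate p.2.toList 0).flatMap (fun q => pts si sj (p.1, q.1) q.2)) := by
    simp only [cellsOf, rowCellsOf, List.flatMap_assoc, List.flatMap_map, Function.comp]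
  rw [h1]
  have h2 : (PySem.List.enumerate lines 0).flatMap (fun p =>
        (PySem.List.enumerate p.2.toList 0).flatMap (fun q => pts si sj (p.1, q.1) q.2))
      = (PySem.List.enumerate lines 0).flatMap (fun p =>
          (if p.1 = si - 1 then rowPickL p.2.toList (si - 1) sj ['|', '7', 'F'] else []) ++
          ((if p.1 = si then rowPickL p.2.toList si (sj - 1) ['-', 'L', 'F'] ++
              rowPickL p.2.toList si (sj + 1) ['-', 'J', '7'] else []) ++
           (if p.1 = si + 1 then rowPickL p.2.toList (si + 1) sj ['|', 'L', 'J'] else []))) := by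
    have hfe : (fun (p : Int × String) =>
        (PySem.List.enumerate p.2.toList 0).flatMap (fun q => pts si sj (p.1, q.1) q.2))
        = (fun (p : Int × String) =>
          (if p.1 = si - 1 then rowPickL p.2.toList (si - 1) sj ['|', '7', 'F'] else []) ++
          ((if p.1 = si then rowPickL p.2.toList si (sj - 1) ['-', 'L', 'F'] ++
              rowPickL p.2.toList si (sj + 1) ['-', 'J', '7'] else []) ++
           (if p.1 = si + 1 then rowPickL p.2.toList (si + 1) sj ['|', 'L', 'J'] else []))) := by
      funext p; exact row_flat si sj p.1 p.2
    rw [hfe]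
  rw [h2]
  refine (enumFlat_pair lines
    (fun k row => if k = si - 1 then rowPickL row.toList (si - 1) sj ['|', '7', 'F'] else [])
    (fun k row =>
      (if k = si then rowPickL row.toList si (sj - 1) ['-', 'L', 'F'] ++
          rowPickL row.toList si (sj + 1) ['-', 'J', '7'] else []) ++
      (if k = si + 1 then rowPickL row.toList (si + 1) sj ['|', 'L', 'J'] else []))
    ?_ 0).trans ?_
  · intro kk a hne kk' a' hle
    have hk : si ≤ kk := by
      by_contra hx
      apply hne
      have e1 : kk ≠ si := by omega
      have e2 : kk ≠ si + 1 := by omega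
      simp [e1, e2]
    exact if_neg (by omega)
  refine congrArg₂ (· ++ ·) ?_ ?_
  · refine (enumFlat_single lines
      (fun k row => if k = si - 1 then rowPickL row.toList (si - 1) sj ['|', '7', 'F'] else [])
      (si - 1) (fun kk a hk => if_neg hk) 0).trans ?_
    rw [sub_zero]
    cases h : atIdx lines (si - 1) <;> simp [pickL, h]
  refine (enumFlat_pair lines
    (fun k row => if k = si then rowPickL row.toList si (sj - 1) ['-', 'L', 'F'] ++
        rowPickL row.toList si (sj + 1) ['-', 'J', '7'] else [])
    (fun k row => if k = si + 1 then rowPickL row.toList (si + 1) sj ['|', 'L', 'J'] else [])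
    ?_ 0).trans ?_
  · intro kk a hne kk' a' hle
    have hk : kk = si + 1 := by
      by_contra hx; exact hne (if_neg hx)
    exact if_neg (by omega)
  refine congrArg₂ (· ++ ·) ?_ ?_
  · refine (enumFlat_single lines
      (fun k row => if k = si then rowPickL row.toList si (sj - 1) ['-', 'L', 'F'] ++
          rowPickL row.toList si (sj + 1) ['-', 'J', '7'] else [])
      si (fun kk a hk => if_neg hk) 0).trans ?_
    rw [sub_zero]
    cases h : atIdx lines si <;> simp
  · refine (enumFlat_single lines
      (fun k row => if k = si + 1 then rowPickL row.toList (si + 1) sj ['|', 'L', 'J'] else [])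
      (si + 1) (fun kk a hk => if_neg hk) 0).trans ?_
    rw [sub_zero]
    cases h : atIdx lines (si + 1) <;> simp [pickL, h]

def condB (lines : List String) (i j : Int) (chars : List Char) : Bool :=
  match atIdx lines i with
  | some row =>
    match atIdx row.toList j with
    | some c => decide (c ∈ chars)
    | none => false
  | none => false

theorem pickL_eq_ite (lines : List String) (i j : Int) (chars : List Char) :
    pickL lines i j chars = if condB lines i j chars then [(i, j)] else [] := by
  unfold pickL condB rowPickL
  cases h : atIdx lines i with
  | none => simp
  | some row =>
    cases h2 : atIdx row.toList j with
    | none => simp [h2]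
    | some c => by_cases hc : c ∈ chars <;> simp [h2, hc]

theorem contains_pick (lines : List String) (i j : Int) (chars : List Char) (n : Int × Int) :
    (pickL lines i j chars).contains n = (decide (n = (i, j)) && condB lines i j chars) := by
  rw [pickL_eq_ite]
  by_cases h : condB lines i j chars <;> by_cases hn : n = (i, j) <;> simp [h, hn]

theorem mid_eq (lines : List String) (si sj : Int) :
    (match atIdx lines si with
     | some row => rowPickL row.toList si (sj - 1) ['-', 'L', 'F'] ++
         rowPickL row.toList si (sj + 1) ['-', 'J', '7']
     | none => []) = pickL lines si (sj - 1) ['-', 'L', 'F'] ++ pickL lines si (sj + 1) ['-', 'J', '7'] := by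
  cases h : atIdx lines si <;> simp [pickL, h]

theorem condA_eq_negj (lines : List String) (i j : Int) (chars : List Char) (hj : ¬ 0 ≤ j) :
    condB lines i j chars = false := by
  have hb : ∀ cs : List Char, atIdx cs j = none := by
    intro cs; unfold atIdx; rw [if_neg hj]
  unfold condB
  cases atIdx lines i <;> simp [hb]

theorem condA_eq (lines : List String) (i j : Int) (chars : List Char) :
    (decide (i ≥ 0) && decide (j ≥ 0) &&
      (match gridAt lines i j with | some c => decide (c ∈ chars) | none => false))
    = condB lines i j chars := by
  by_cases hi : 0 ≤ i
  · by_cases hj : 0 ≤ j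
    · have hline : PySem.List.pyGet? lines i = atIdx lines i := by
        unfold atIdx; rw [if_pos hi]; exact PySem.List.pyGet?_of_nonneg _ hi
      have hg : gridAt lines i j = (match atIdx lines i with
          | some row => atIdx row.toList j
          | none => none) := by
        unfold gridAt
        rw [hline]
        cases atIdx lines i with
        | none => rfl
        | some row =>
          show PySem.Str.pyGet? row j = atIdx row.toList j
          unfold atIdx; rw [if_pos hj]
          simp [PySem.Str.pyGet?, PySem.List.pyGet?_of_nonneg _ hj]
      unfold condB
      rw [hg]
      cases atIdx lines i with
      | none => simp
      | some row => cases atIdx row.toList j <;> simp [hi, hj, ge_iff_le]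
    · rw [condA_eq_negj lines i j chars hj]
      simp [hj, ge_iff_le]
  · have hb : atIdx lines i = none := by unfold atIdx; rw [if_neg hi]
    unfold condB
    simp [hb, hi, ge_iff_le]

theorem findRow_nonneg (cs : List Char) : ∀ j b, pyFindStartRow cs j = some b → j ≤ b := by
  induction cs with
  | nil => intro j b h; simp [pyFindStartRow] at h
  | cons c t ih =>
    intro j b h
    unfold pyFindStartRow at h
    by_cases hc : c = 'S'
    · rw [if_pos hc] at h
      injection h with h
      omega
    · rw [if_neg hc] at h
      have := ih (j + 1) b h
      omega

theorem find_nonneg (ls : List String) : ∀ i a b, pyFindStart ls i = some (a, b) → i ≤ a ∧ 0 ≤ b := by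
  induction ls with
  | nil => intro i a b h; simp [pyFindStart] at h
  | cons s t ih =>
    intro i a b h
    unfold pyFindStart at h
    cases hr : pyFindStartRow s.toList 0 with
    | some jj =>
      rw [hr] at h
      have hj := findRow_nonneg s.toList 0 jj hr
      simp at h
      obtain ⟨h1, h2⟩ := h
      omega
    | none =>
      rw [hr] at h
      have := ih (i + 1) a b h
      omega

theorem val_left (lines : List String) (si sj : Int) :
    (match pyValidateStep (si, sj) (si, sj - 1) lines with
     | some (some _) => true | _ => false)
    = (match gridAt lines si (sj - 1) with
       | some c => decide (c ∈ ['-', 'L', 'F']) | none => false) := by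
  have hsd : pyGetStepDirection (si, sj) (si, sj - 1) = "left" := by
    simp [pyGetStepDirection]
  cases hg : gridAt lines si (sj - 1) with
  | none => simp [pyValidateStep, hg]
  | some c =>
    simp only [pyValidateStep, hg, hsd]
    by_cases h1 : c = '|' <;> by_cases h2 : c = '-' <;> by_cases h3 : c = 'L' <;>
      by_cases h4 : c = 'J' <;> by_cases h5 : c = '7' <;> by_cases h6 : c = 'F' <;>
      simp_all

theorem val_right (lines : List String) (si sj : Int) :
    (match pyValidateStep (si, sj) (si, sj + 1) lines with
     | some (some _) => true | _ => false)
    = (match gridAt lines si (sj + 1) with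
       | some c => decide (c ∈ ['-', 'J', '7']) | none => false) := by
  have hsd : pyGetStepDirection (si, sj) (si, sj + 1) = "right" := by
    have hne : sj + 1 ≠ sj - 1 := by omega
    simp [pyGetStepDirection, hne]
  cases hg : gridAt lines si (sj + 1) with
  | none => simp [pyValidateStep, hg]
  | some c =>
    simp only [pyValidateStep, hg, hsd]
    by_cases h1 : c = '|' <;> by_cases h2 : c = '-' <;> by_cases h3 : c = 'L' <;>
      by_cases h4 : c = 'J' <;> by_cases h5 : c = '7' <;> by_cases h6 : c = 'F' <;>
      simp_all

theorem val_up (lines : List String) (si sj : Int) :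
    (match pyValidateStep (si, sj) (si - 1, sj) lines with
     | some (some _) => true | _ => false)
    = (match gridAt lines (si - 1) sj with
       | some c => decide (c ∈ ['|', '7', 'F']) | none => false) := by
  have hsd : pyGetStepDirection (si, sj) (si - 1, sj) = "up" := by
    have ha : si - 1 ≠ si := by omega
    have hb : si - 1 ≠ si + 1 := by omega
    simp [pyGetStepDirection, ha, hb]
  cases hg : gridAt lines (si - 1) sj with
  | none => simp [pyValidateStep, hg]
  | some c =>
    simp only [pyValidateStep, hg, hsd]
    by_cases h1 : c = '|' <;> by_cases h2 : c = '-' <;> by_cases h3 : c = 'L' <;>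
      by_cases h4 : c = 'J' <;> by_cases h5 : c = '7' <;> by_cases h6 : c = 'F' <;>
      simp_all

theorem val_down (lines : List String) (si sj : Int) :
    (match pyValidateStep (si, sj) (si + 1, sj) lines with
     | some (some _) => true | _ => false)
    = (match gridAt lines (si + 1) sj with
       | some c => decide (c ∈ ['|', 'L', 'J']) | none => false) := by
  have hsd : pyGetStepDirection (si, sj) (si + 1, sj) = "down" := by
    have ha : si + 1 ≠ si := by omega
    simp [pyGetStepDirection, ha]
  cases hg : gridAt lines (si + 1) sj with
  | none => simp [pyValidateStep, hg]
  | some c =>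
    simp only [pyValidateStep, hg, hsd]
    by_cases h1 : c = '|' <;> by_cases h2 : c = '-' <;> by_cases h3 : c = 'L' <;>
      by_cases h4 : c = 'J' <;> by_cases h5 : c = '7' <;> by_cases h6 : c = 'F' <;>
      simp_all

set_option maxHeartbeats 1000000 in
theorem main_eq (lines : List String) : get_srcs_dests lines = get_srcs_dests_alt lines := by
  unfold get_srcs_dests get_srcs_dests_alt
  rw [portFold_eq, start_eq]
  cases hs : pyFindStart lines 0 with
  | none => rfl
  | some st =>
    obtain ⟨si, sj⟩ := st
    obtain ⟨h0, hj⟩ := find_nonneg lines 0 si sj hs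
    have d11 : ((si, sj - 1) : Int × Int) ≠ (si - 1, sj) := by
      intro hh; rw [Prod.mk.injEq] at hh; omega
    have d13 : ((si, sj - 1) : Int × Int) ≠ (si, sj + 1) := by
      intro hh; rw [Prod.mk.injEq] at hh; omega
    have d14 : ((si, sj - 1) : Int × Int) ≠ (si + 1, sj) := by
      intro hh; rw [Prod.mk.injEq] at hh; omega
    have d21 : ((si, sj + 1) : Int × Int) ≠ (si - 1, sj) := by
      intro hh; rw [Prod.mk.injEq] at hh; omega
    have d22 : ((si, sj + 1) : Int × Int) ≠ (si, sj - 1) := by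
      intro hh; rw [Prod.mk.injEq] at hh; omega
    have d24 : ((si, sj + 1) : Int × Int) ≠ (si + 1, sj) := by
      intro hh; rw [Prod.mk.injEq] at hh; omega
    have d32 : ((si - 1, sj) : Int × Int) ≠ (si, sj - 1) := by
      intro hh; rw [Prod.mk.injEq] at hh; omega
    have d33 : ((si - 1, sj) : Int × Int) ≠ (si, sj + 1) := by
      intro hh; rw [Prod.mk.injEq] at hh; omega
    have d34 : ((si - 1, sj) : Int × Int) ≠ (si + 1, sj) := by
      intro hh; rw [Prod.mk.injEq] at hh; omega
    have d41 : ((si + 1, sj) : Int × Int) ≠ (si - 1, sj) := by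
      intro hh; rw [Prod.mk.injEq] at hh; omega
    have d42 : ((si + 1, sj) : Int × Int) ≠ (si, sj - 1) := by
      intro hh; rw [Prod.mk.injEq] at hh; omega
    have d43 : ((si + 1, sj) : Int × Int) ≠ (si, sj + 1) := by
      intro hh; rw [Prod.mk.injEq] at hh; omega
    simp only [getD_fold, pointing_eq, mid_eq]
    simp only [List.filter_cons, List.filter_nil]
    rw [val_left, val_right, val_up, val_down,
      condA_eq lines si (sj - 1) ['-', 'L', 'F'],
      condA_eq lines si (sj + 1) ['-', 'J', '7'],
      condA_eq lines (si - 1) sj ['|', '7', 'F'],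
      condA_eq lines (si + 1) sj ['|', 'L', 'J']]
    simp only [List.contains_append, contains_pick]
    simp [d11, d13, d14, d21, d22, d24, d32, d33, d34, d41, d42, d43]

-- ===== VERDICT (by name: the statement is the Claim_ definition above) =====
theorem get_srcs_dests_spec : Claim_equal_get_srcs_dests := by
  intro lines _ _
  unfold Spec_get_srcs_dests
  exact main_eq lines
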